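-- pv_equiv track=rewrite | github.com/rmabirohi5278-code/event-management | ATM STIMULATION.py | build_categories
-- ===== SOURCE A (Python) =====
-- def build_categories(products):
--     return {
--         "Furniture": {k: v for k, v in products.items() if k in {
--             'Sofa','Dining Table','Chair 1','Chair 2','Chair 3','Bed','Wardrobe','Study Table','Bookshelf','Recliner'}},
--         "Clothes": {k: v for k, v in products.items() if any(prefix in k for prefix in ('T-shirt','Jeans','Jacket','Kurti','Hoodie','Saree','Shorts','Formal'))},
--         "Accessories": {k: v for k, v in products.items() if k in {'Watch 1','Watch 2','Watch 3','Belt','Handbag','Sunglasses','Wallet','Earrings','Cap','Bracelet'}},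
--         "Electronics": {k: v for k, v in products.items() if k in {'Samsung A55','Redmi Note 13 Pro','Vivo V29','Laptop HP Pavilion','Headphones','Smartwatch','Bluetooth Speaker','Tablet','Power Bank','Gaming Mouse'}}
--     }
-- ===== SOURCE B (Python) =====
-- _CLOTHES_PREFIXES = ('T-shirt', 'Jeans', 'Jacket', 'Kurti', 'Hoodie', 'Saree', 'Shorts', 'Formal')
--
-- # one merged exact-name lookup table (the three exact-membership sets, tagged with their category)
-- _EXACT_CATEGORY = {
--     'Sofa': 'Furniture', 'Dining Table': 'Furniture', 'Chair 1': 'Furniture', 'Chair 2': 'Furniture',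
--     'Chair 3': 'Furniture', 'Bed': 'Furniture', 'Wardrobe': 'Furniture', 'Study Table': 'Furniture',
--     'Bookshelf': 'Furniture', 'Recliner': 'Furniture',
--     'Watch 1': 'Accessories', 'Watch 2': 'Accessories', 'Watch 3': 'Accessories', 'Belt': 'Accessories',
--     'Handbag': 'Accessories', 'Sunglasses': 'Accessories', 'Wallet': 'Accessories', 'Earrings': 'Accessories',
--     'Cap': 'Accessories', 'Bracelet': 'Accessories',
--     'Samsung A55': 'Electronics', 'Redmi Note 13 Pro': 'Electronics', 'Vivo V29': 'Electronics',
--     'Laptop HP Pavilion': 'Electronics', 'Headphones': 'Electronics', 'Smartwatch': 'Electronics',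
--     'Bluetooth Speaker': 'Electronics', 'Tablet': 'Electronics', 'Power Bank': 'Electronics',
--     'Gaming Mouse': 'Electronics',
-- }
--
--
-- def build_categories(products):
--     furniture, clothes, accessories, electronics = {}, {}, {}, {}
--     for k, v in products.items():
--         cat = _EXACT_CATEGORY.get(k)
--         if cat == 'Furniture':
--             furniture[k] = v
--         elif cat == 'Accessories':
--             accessories[k] = v
--         elif cat == 'Electronics':
--             electronics[k] = v
--         if any(p in k for p in _CLOTHES_PREFIXES):
--             clothes[k] = v
--     return {"Furniture": furniture, "Clothes": clothes,
--             "Accessories": accessories, "Electronics": electronics}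
-- ===== Notes on version B (the rewrite author's own statement) =====
-- stated objective: alternative
-- what changed: Replaces A's four separate comprehension scans over products.items() with one pass that dispatches each key via a single merged exact-name-to-category lookup dict (the three membership sets tagged and unioned) plus the independent clothes substring test.
import Mathlib
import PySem

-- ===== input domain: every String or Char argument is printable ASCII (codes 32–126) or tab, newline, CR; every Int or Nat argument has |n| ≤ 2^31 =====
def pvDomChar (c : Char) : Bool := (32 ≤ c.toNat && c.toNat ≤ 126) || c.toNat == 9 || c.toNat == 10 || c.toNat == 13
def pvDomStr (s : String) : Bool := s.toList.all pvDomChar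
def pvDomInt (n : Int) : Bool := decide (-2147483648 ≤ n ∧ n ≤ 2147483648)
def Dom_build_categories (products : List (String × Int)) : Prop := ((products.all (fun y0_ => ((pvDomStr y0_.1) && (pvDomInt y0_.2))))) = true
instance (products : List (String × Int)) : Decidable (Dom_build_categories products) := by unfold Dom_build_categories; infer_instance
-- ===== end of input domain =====

-- B replaces A's four comprehension scans by one pass with a single merged name→category lookup
-- table plus the clothes substring test (alternative dispatch); return-value equivalence on
-- duplicate-free key lists (Python dict inputs).

-- ===== PORT A =====
-- four dict comprehensions, each its own scan of products.items()
def build_categories (products : List (String × Int)) : List (String × List (String × Int)) :=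
  [("Furniture", products.filter (fun p =>
      ["Sofa", "Dining Table", "Chair 1", "Chair 2", "Chair 3", "Bed", "Wardrobe",
       "Study Table", "Bookshelf", "Recliner"].contains p.1)),
   ("Clothes", products.filter (fun p =>
      ["T-shirt", "Jeans", "Jacket", "Kurti", "Hoodie", "Saree", "Shorts", "Formal"].any
        (fun pre => PySem.Str.isIn pre p.1))),
   ("Accessories", products.filter (fun p =>
      ["Watch 1", "Watch 2", "Watch 3", "Belt", "Handbag", "Sunglasses", "Wallet",
       "Earrings", "Cap", "Bracelet"].contains p.1)),
   ("Electronics", products.filter (fun p =>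
      ["Samsung A55", "Redmi Note 13 Pro", "Vivo V29", "Laptop HP Pavilion", "Headphones",
       "Smartwatch", "Bluetooth Speaker", "Tablet", "Power Bank", "Gaming Mouse"].contains p.1))]

-- ===== PORT B =====
-- the merged exact-name lookup table _EXACT_CATEGORY (a dict literal with distinct keys)
def pvExactCat : PySem.Dict String String := PySem.Dict.mk
  [("Sofa", "Furniture"), ("Dining Table", "Furniture"), ("Chair 1", "Furniture"),
   ("Chair 2", "Furniture"), ("Chair 3", "Furniture"), ("Bed", "Furniture"),
   ("Wardrobe", "Furniture"), ("Study Table", "Furniture"), ("Bookshelf", "Furniture"),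
   ("Recliner", "Furniture"),
   ("Watch 1", "Accessories"), ("Watch 2", "Accessories"), ("Watch 3", "Accessories"),
   ("Belt", "Accessories"), ("Handbag", "Accessories"), ("Sunglasses", "Accessories"),
   ("Wallet", "Accessories"), ("Earrings", "Accessories"), ("Cap", "Accessories"),
   ("Bracelet", "Accessories"),
   ("Samsung A55", "Electronics"), ("Redmi Note 13 Pro", "Electronics"),
   ("Vivo V29", "Electronics"), ("Laptop HP Pavilion", "Electronics"),
   ("Headphones", "Electronics"), ("Smartwatch", "Electronics"),
   ("Bluetooth Speaker", "Electronics"), ("Tablet", "Electronics"),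
   ("Power Bank", "Electronics"), ("Gaming Mouse", "Electronics")]

def pvClothesPrefixes : List String :=
  ["T-shirt", "Jeans", "Jacket", "Kurti", "Hoodie", "Saree", "Shorts", "Formal"]

-- loop body: cat = _EXACT_CATEGORY.get(k); if/elif dispatch, then the independent clothes test
def pvAltStep (st : PySem.Dict String Int × PySem.Dict String Int × PySem.Dict String Int × PySem.Dict String Int)
    (x : String × Int) :
    PySem.Dict String Int × PySem.Dict String Int × PySem.Dict String Int × PySem.Dict String Int :=
  let cat := pvExactCat.get? x.1
  let fae :=
    if cat == some "Furniture" then (st.1.insert x.1 x.2, st.2.2.1, st.2.2.2)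
    else if cat == some "Accessories" then (st.1, st.2.2.1.insert x.1 x.2, st.2.2.2)
    else if cat == some "Electronics" then (st.1, st.2.2.1, st.2.2.2.insert x.1 x.2)
    else (st.1, st.2.2.1, st.2.2.2)
  let c := if pvClothesPrefixes.any (fun p => PySem.Str.isIn p x.1) then st.2.1.insert x.1 x.2 else st.2.1
  (fae.1, c, fae.2.1, fae.2.2)

def build_categories_alt (products : List (String × Int)) : List (String × List (String × Int)) :=
  let st := products.foldl pvAltStep (PySem.Dict.empty, PySem.Dict.empty, PySem.Dict.empty, PySem.Dict.empty)
  [("Furniture", st.1.items), ("Clothes", st.2.1.items),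
   ("Accessories", st.2.2.1.items), ("Electronics", st.2.2.2.items)]

-- ===== PRECONDITION & SPEC =====
-- Pre_ restricts to duplicate-free key lists: the Python parameter is a dict, whose keys are unique
-- by construction, so association lists with duplicate keys correspond to no Python input at all.
def Pre_build_categories (products : List (String × Int)) : Prop := (products.map Prod.fst).Nodup

instance (products : List (String × Int)) : Decidable (Pre_build_categories products) := by unfold Pre_build_categories; infer_instance

def pvWitness_build_categories : (List (String × Int)) :=
  [("Sofa", 1), ("JeansX", 2), ("Watch 1", 3), ("Tablet", 4), ("foo", 5)]

def Spec_build_categories (products : List (String × Int)) (out : List (String × List (String × Int))) : Prop := out = build_categories_alt products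
instance (products : List (String × Int)) (out : List (String × List (String × Int))) : Decidable (Spec_build_categories products out) := by unfold Spec_build_categories; infer_instance

-- ===== CLAIM (what is proved, stated in full; the proofs are below) =====
def Claim_equal_build_categories : Prop := ∀ (products : List (String × Int)), Dom_build_categories products → Pre_build_categories products → Spec_build_categories products (build_categories products)

-- ===== LEMMAS AND PROOFS =====

-- the four per-key conditions B's loop body actually tests (elif = "previous guards failed")
def pvCondF (k : String) : Bool := pvExactCat.get? k == some "Furniture"
def pvCondA (k : String) : Bool := !pvCondF k && (pvExactCat.get? k == some "Accessories")
def pvCondE (k : String) : Bool :=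
  !pvCondF k && !(pvExactCat.get? k == some "Accessories") && (pvExactCat.get? k == some "Electronics")
def pvCondC (k : String) : Bool := pvClothesPrefixes.any (fun p => PySem.Str.isIn p k)

-- the loop body written componentwise with those guards
theorem pvAltStep_eq (st : PySem.Dict String Int × PySem.Dict String Int × PySem.Dict String Int × PySem.Dict String Int)
    (x : String × Int) :
    pvAltStep st x =
      (if pvCondF x.1 then st.1.insert x.1 x.2 else st.1,
       if pvCondC x.1 then st.2.1.insert x.1 x.2 else st.2.1,
       if pvCondA x.1 then st.2.2.1.insert x.1 x.2 else st.2.2.1,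
       if pvCondE x.1 then st.2.2.2.insert x.1 x.2 else st.2.2.2) := by
  unfold pvAltStep pvCondF pvCondA pvCondE pvCondC
  cases hF : (pvExactCat.get? x.1 == some "Furniture") <;>
    cases hA : (pvExactCat.get? x.1 == some "Accessories") <;>
      cases hE : (pvExactCat.get? x.1 == some "Electronics") <;>
        cases hC : (pvClothesPrefixes.any fun p => PySem.Str.isIn p x.1) <;>
          simp [pvCondF, pvCondA, pvCondE, pvCondC, hF, hA, hE, hC]

-- a tag-membership loop never fires on keys absent from the list
theorem pv_any_key_false {α : Type} (t : List (String × α)) (k : String) (q : String × α → Bool)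
    (h : ∀ p ∈ t, p.1 ≠ k) : (t.any (fun p => p.1 == k && q p)) = false := by
  simp only [List.any_eq_false]
  intro p hp
  simp [h p hp]

-- a literal-dict lookup, compared with a constant tag, is a tagged any-scan of the pair list
theorem pv_get?_mk_tag (c k : String) (l : List (String × String))
    (hnd : (l.map Prod.fst).Nodup) :
    ((PySem.Dict.mk l).get? k == some c) = l.any (fun p => p.1 == k && p.2 == c) := by
  induction l with
  | nil => simp [PySem.Dict.get?]
  | cons a t ih =>
    simp only [List.map_cons, List.nodup_cons] at hnd
    rw [PySem.Dict.get?_mk_cons]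
    by_cases hak : a.1 = k
    · subst hak
      simp only [List.any_cons, beq_self_eq_true, if_true, Bool.true_and]
      rw [pv_any_key_false t a.1 _ (fun p hp hh => hnd.1 (hh ▸ (List.mem_map_of_mem hp)))]
      simp
    · have hb : (a.1 == k) = false := by simp [hak]
      rw [if_neg (by simp [hb])]
      simp only [List.any_cons, hb, Bool.false_and, Bool.false_or]
      exact ih hnd.2

-- a lookup result cannot equal two distinct tags: the failed elif guard is redundant
theorem pv_band_not_beq {o : Option String} {c c' : String} (h : c ≠ c') :
    ((!(o == some c)) && (o == some c')) = (o == some c') := by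
  cases o with
  | none => simp
  | some a => by_cases h2 : a = c' <;> simp [h2, Ne.symm h]

-- the table lookup agrees with A's three exact-membership tests
set_option maxHeartbeats 1000000 in
theorem pvCondF_eq (k : String) :
    pvCondF k = (["Sofa", "Dining Table", "Chair 1", "Chair 2", "Chair 3", "Bed", "Wardrobe",
       "Study Table", "Bookshelf", "Recliner"].contains k) := by
  rw [pvCondF, pvExactCat, pv_get?_mk_tag _ _ _ (by decide)]
  simp only [List.any_cons, List.any_nil, List.contains_cons, List.contains_nil, beq_eq_decide, Bool.or_false]
  simp [eq_comm]

set_option maxHeartbeats 1000000 in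
theorem pvCondA_eq (k : String) :
    pvCondA k = (["Watch 1", "Watch 2", "Watch 3", "Belt", "Handbag", "Sunglasses", "Wallet",
       "Earrings", "Cap", "Bracelet"].contains k) := by
  rw [pvCondA, pvCondF, pv_band_not_beq (by decide), pvExactCat, pv_get?_mk_tag _ _ _ (by decide)]
  simp only [List.any_cons, List.any_nil, List.contains_cons, List.contains_nil, beq_eq_decide, Bool.or_false]
  simp [eq_comm]

set_option maxHeartbeats 1000000 in
theorem pvCondE_eq (k : String) :
    pvCondE k = (["Samsung A55", "Redmi Note 13 Pro", "Vivo V29", "Laptop HP Pavilion", "Headphones",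
       "Smartwatch", "Bluetooth Speaker", "Tablet", "Power Bank", "Gaming Mouse"].contains k) := by
  rw [pvCondE, pvCondF, Bool.and_assoc, pv_band_not_beq (by decide), pv_band_not_beq (by decide),
      pvExactCat, pv_get?_mk_tag _ _ _ (by decide)]
  simp only [List.any_cons, List.any_nil, List.contains_cons, List.contains_nil, beq_eq_decide, Bool.or_false]
  simp [eq_comm]

-- inserting a fresh-keyed pair into a dict appends it to items, for each branch of the dispatch
theorem pv_items_step {d : PySem.Dict String Int} {k : String} {v : Int} (c : Bool)
    (h : d.contains k = false) :
    (if c then d.insert k v else d).items = d.items ++ (if c then [(k, v)] else []) := by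
  cases c with
  | true =>
    simp only [if_true]
    rw [PySem.Dict.items_insert]
    simp [h]
  | false => simp

-- loop invariant: folding a fresh-keyed duplicate-free tail appends the filtered tail to each items list
theorem pv_fold_inv (l : List (String × Int))
    (f c a e : PySem.Dict String Int)
    (hnd : (l.map Prod.fst).Nodup)
    (hf : ∀ k ∈ l.map Prod.fst, f.contains k = false)
    (hc : ∀ k ∈ l.map Prod.fst, c.contains k = false)
    (ha : ∀ k ∈ l.map Prod.fst, a.contains k = false)
    (he : ∀ k ∈ l.map Prod.fst, e.contains k = false) :
    (l.foldl pvAltStep (f, c, a, e)).1.items = f.items ++ l.filter (fun p => pvCondF p.1) ∧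
    (l.foldl pvAltStep (f, c, a, e)).2.1.items = c.items ++ l.filter (fun p => pvCondC p.1) ∧
    (l.foldl pvAltStep (f, c, a, e)).2.2.1.items = a.items ++ l.filter (fun p => pvCondA p.1) ∧
    (l.foldl pvAltStep (f, c, a, e)).2.2.2.items = e.items ++ l.filter (fun p => pvCondE p.1) := by
  induction l generalizing f c a e with
  | nil => simp
  | cons x t ih =>
    obtain ⟨k, v⟩ := x
    simp only [List.map_cons, List.nodup_cons, List.mem_cons, forall_eq_or_imp] at hnd hf hc ha he
    have fresh : ∀ (d : PySem.Dict String Int) (cond : Bool),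
        (∀ k' ∈ t.map Prod.fst, d.contains k' = false) →
        ∀ k' ∈ t.map Prod.fst, (if cond then d.insert k v else d).contains k' = false := by
      intro d cond hd k' hk'
      cases cond with
      | true =>
        simp only [if_true]
        rw [PySem.Dict.contains_insert]
        have hne : k' ≠ k := fun h => hnd.1 (h ▸ hk')
        simp [hne, hd k' hk']
      | false => simpa using hd k' hk'
    have ih' := ih
      (if pvCondF k then f.insert k v else f)
      (if pvCondC k then c.insert k v else c)
      (if pvCondA k then a.insert k v else a)
      (if pvCondE k then e.insert k v else e)
      hnd.2
      (fresh f _ hf.2) (fresh c _ hc.2) (fresh a _ ha.2) (fresh e _ he.2)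
    simp only [List.foldl_cons, pvAltStep_eq]
    refine ⟨?_, ?_, ?_, ?_⟩
    · rw [ih'.1, pv_items_step _ hf.1]
      cases h : pvCondF k <;> simp [h]
    · rw [ih'.2.1, pv_items_step _ hc.1]
      cases h : pvCondC k <;> simp [h]
    · rw [ih'.2.2.1, pv_items_step _ ha.1]
      cases h : pvCondA k <;> simp [h]
    · rw [ih'.2.2.2, pv_items_step _ he.1]
      cases h : pvCondE k <;> simp [h]

-- ===== VERDICT (by name: the statement is the Claim_ definition above) =====
theorem build_categories_spec : Claim_equal_build_categories := by
  intro products _ hpre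
  have inv := pv_fold_inv products PySem.Dict.empty PySem.Dict.empty PySem.Dict.empty PySem.Dict.empty
    hpre (by simp) (by simp) (by simp) (by simp)
  unfold Spec_build_categories build_categories build_categories_alt
  simp only []
  rw [inv.1, inv.2.1, inv.2.2.1, inv.2.2.2]
  have hF : products.filter (fun p => pvCondF p.1) = products.filter (fun p =>
      ["Sofa", "Dining Table", "Chair 1", "Chair 2", "Chair 3", "Bed", "Wardrobe",
       "Study Table", "Bookshelf", "Recliner"].contains p.1) :=
    List.filter_congr (fun p _ => pvCondF_eq p.1)
  have hA : products.filter (fun p => pvCondA p.1) = products.filter (fun p =>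
      ["Watch 1", "Watch 2", "Watch 3", "Belt", "Handbag", "Sunglasses", "Wallet",
       "Earrings", "Cap", "Bracelet"].contains p.1) :=
    List.filter_congr (fun p _ => pvCondA_eq p.1)
  have hE : products.filter (fun p => pvCondE p.1) = products.filter (fun p =>
      ["Samsung A55", "Redmi Note 13 Pro", "Vivo V29", "Laptop HP Pavilion", "Headphones",
       "Smartwatch", "Bluetooth Speaker", "Tablet", "Power Bank", "Gaming Mouse"].contains p.1) :=
    List.filter_congr (fun p _ => pvCondE_eq p.1)
  rw [hF, hA, hE]
  simp [show (PySem.Dict.empty : PySem.Dict String Int).items = [] from rfl, pvCondC, pvClothesPrefixes]
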